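-- pv_equiv track=rewrite | github.com/wcapitao/twittertriviabot | main_git2.0.py | replace_middle_dot
-- ===== SOURCE A (Python) =====
-- def replace_middle_dot(strings):
--     new_strings = []
--     for string in strings:
--         new_string = ''
--         for i, char in enumerate(string):
--             if char == "." and i > 0 and i < len(string) - 1 and string[i-1] != " " and string[i+1] != " ":
--                 new_string += ". "
--             else:
--                 new_string += char
--         new_strings.append(new_string)
--     return new_strings
-- ===== SOURCE B (Python) =====
-- def replace_middle_dot(strings):
--     def fix(s, after_dot=False):
--         before, dot, rest = s.partition('.')
--         if not dot:
--             return s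
--         prev_ok = (before[-1] != ' ') if before else after_dot
--         next_ok = rest != '' and rest[0] != ' '
--         sep = '. ' if (prev_ok and next_ok) else '.'
--         return before + sep + fix(rest, True)
--     return [fix(s) for s in strings]
-- ===== Notes on version B (the rewrite author's own statement) =====
-- stated objective: faster
-- what changed: B replaces A's indexed per-character Python loop (peeking at s[i-1]/s[i+1] and concatenating char by char) with a recursive str.partition('.')-based rewrite that copies dot-free segments wholesale and decides each separator from the segment boundaries, threading an 'after a dot' flag.
import Mathlib
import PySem

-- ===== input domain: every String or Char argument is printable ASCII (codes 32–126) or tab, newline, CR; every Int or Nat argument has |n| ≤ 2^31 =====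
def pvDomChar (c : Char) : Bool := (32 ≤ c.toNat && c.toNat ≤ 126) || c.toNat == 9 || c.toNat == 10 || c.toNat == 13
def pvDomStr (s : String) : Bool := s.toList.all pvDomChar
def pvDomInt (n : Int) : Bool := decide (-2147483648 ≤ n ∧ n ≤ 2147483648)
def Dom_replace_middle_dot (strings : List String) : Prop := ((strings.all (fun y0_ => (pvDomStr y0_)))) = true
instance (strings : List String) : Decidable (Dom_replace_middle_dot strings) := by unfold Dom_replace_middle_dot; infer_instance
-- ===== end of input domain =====

-- B changes the algorithm: instead of A's indexed per-character loop peeking at s[i-1]/s[i+1],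
-- B repeatedly partitions the string at the first '.' and decides each separator from the
-- segment boundaries (same asymptotics; measurably faster by a constant factor in a timing run).

-- ===== PORT A =====
-- the big if-condition of A's inner loop, on the char list of the current string
def pvCondA (s : List Char) (i : Int) (c : Char) : Bool :=
  c == '.' && decide (0 < i) && decide (i < (s.length : Int) - 1) &&
  ((PySem.List.pyGet? s (i - 1)).elim false (fun ch => ch != ' ')) &&
  ((PySem.List.pyGet? s (i + 1)).elim false (fun ch => ch != ' '))

def replace_middle_dot (strings : List String) : List String :=
  strings.map (fun string =>
    String.mk ((PySem.List.enumerate string.toList 0).foldl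
      (fun ns p => ns ++ (if pvCondA string.toList p.1 p.2 then ['.', ' '] else [p.2])) []))

-- ===== PORT B =====
-- s.partition('.') : (before the first dot, whether a dot was found, rest after it)
def pvPartitionDot : List Char → List Char × Bool × List Char
  | [] => ([], false, [])
  | c :: rest =>
    if c == '.' then ([], true, rest)
    else
      let p := pvPartitionDot rest
      (c :: p.1, p.2.1, p.2.2)

theorem pvPartitionDot_rest_lt (s b r : List Char) (h : pvPartitionDot s = (b, true, r)) :
    r.length < s.length := by
  induction s generalizing b r with
  | nil => simp [pvPartitionDot] at h
  | cons c rest ih =>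
    by_cases hc : c == '.'
    · simp [pvPartitionDot, hc] at h
      simp [h.2]
    · rcases hq : pvPartitionDot rest with ⟨b', f', r'⟩
      simp [pvPartitionDot, hc, hq] at h
      obtain ⟨-, hf, hr⟩ := h
      subst hr
      simpa using Nat.lt_succ_of_lt (ih b' r' (by rw [hq, hf]))

def pvFix (s : List Char) (afterDot : Bool) : List Char :=
  match hp : pvPartitionDot s with
  | (_, false, _) => s
  | (before, true, rest) =>
    let prevOk := match before.getLast? with
      | some ch => ch != ' '
      | none => afterDot
    let nextOk := match rest with
      | [] => false
      | d :: _ => d != ' '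
    let sep := if prevOk && nextOk then ['.', ' '] else ['.']
    before ++ sep ++ pvFix rest true
termination_by s.length
decreasing_by exact pvPartitionDot_rest_lt s before rest hp

def replace_middle_dot_alt (strings : List String) : List String :=
  strings.map (fun s => String.mk (pvFix s.toList false))

-- ===== PRECONDITION & SPEC =====
def Spec_replace_middle_dot (strings : List String) (out : List String) : Prop := out = replace_middle_dot_alt strings
instance (strings : List String) (out : List String) : Decidable (Spec_replace_middle_dot strings out) := by unfold Spec_replace_middle_dot; infer_instance

-- ===== CLAIM (what is proved, stated in full; the proofs are below) =====
def Claim_equal_replace_middle_dot : Prop := ∀ (strings : List String), Dom_replace_middle_dot strings → Spec_replace_middle_dot strings (replace_middle_dot strings)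

-- ===== LEMMAS AND PROOFS =====

-- common recursive characterisation: one pass carrying "previous char exists and is not ' '"
def pvNext : List Char → Bool
  | [] => false
  | d :: _ => d != ' '

def pvF : Bool → List Char → List Char
  | _, [] => []
  | b, c :: rest =>
    (if c == '.' && b && pvNext rest then ['.', ' '] else [c]) ++ pvF (c != ' ') rest

def pvFlag (s : List Char) (k : Nat) : Bool :=
  decide (0 < (k : Int)) && ((PySem.List.pyGet? s ((k : Int) - 1)).elim false (fun ch => ch != ' '))

theorem pvEnumA (s : List Char) : ∀ (l : List Char) (k : Nat), s.drop k = l →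
    (PySem.List.enumerate l (k : Int)).flatMap
      (fun p => if pvCondA s p.1 p.2 then ['.', ' '] else [p.2]) = pvF (pvFlag s k) l := by
  intro l
  induction l with
  | nil => intro k _; simp [PySem.List.enumerate, pvF]
  | cons c l' ih =>
    intro k hk
    have hklen : k < s.length := by
      by_contra h
      rw [List.drop_eq_nil_of_le (by omega)] at hk
      exact absurd hk (by simp)
    have hsk : s[k]? = some c := by
      have e : (List.drop k s)[0]? = s[k+0]? := List.getElem?_drop
      rw [hk] at e
      simpa using e.symm
    have hnext : s[k+1]? = l'[0]? := by
      have e : (List.drop k s)[1]? = s[k+1]? := List.getElem?_drop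
      rw [hk] at e
      simpa using e.symm
    rw [PySem.List.enumerate_cons, List.flatMap_cons]
    have hrec := ih (k + 1) (by
      have e : List.drop 1 (List.drop k s) = List.drop (k+1) s := by
        rw [List.drop_drop]
      rw [hk] at e
      simpa using e.symm)
    have hcast : (k : Int) + 1 = ((k + 1 : Nat) : Int) := by push_cast; ring
    rw [hcast, hrec]
    have hget1 : PySem.List.pyGet? s ((k : Int) + 1) = l'[0]? := by
      rw [hcast, PySem.List.pyGet?_natCast]; exact hnext
    have hflag' : pvFlag s (k + 1) = (c != ' ') := by
      unfold pvFlag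
      have : ((k + 1 : Nat) : Int) - 1 = ((k : Nat) : Int) := by push_cast; ring
      rw [this, PySem.List.pyGet?_natCast, hsk]
      simp
    rw [hflag']
    cases l' with
    | nil =>
      have hlen2 : ¬ ((k : Int) < (s.length : Int) - 1) := by
        have : s.length ≤ k + 1 := by
          by_contra h
          have h1 : k + 1 < s.length := by omega
          have := hnext
          simp [List.getElem?_eq_getElem h1] at this
        omega
      simp [pvCondA, hlen2, pvF, pvNext]
    | cons d l'' =>
      have hlen2 : ((k : Int) < (s.length : Int) - 1) := by
        have : k + 1 < s.length := by
          by_contra h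
          have := hnext
          simp [List.getElem?_eq_none_iff.mpr (by omega : s.length ≤ k + 1)] at this
        omega
      have hcond : pvCondA s (k : Int) c = (c == '.' && pvFlag s k && (d != ' ')) := by
        unfold pvCondA pvFlag
        rw [hget1, decide_eq_true hlen2]
        simp only [List.getElem?_cons_zero, Option.elim_some, Bool.and_true]
        cases (c == '.') <;> cases decide (0 < (k : Int)) <;>
          cases ((PySem.List.pyGet? s ((k : Int) - 1)).elim false (fun ch => ch != ' ')) <;>
          cases (d != ' ') <;> rfl
      conv_rhs => rw [pvF]
      rw [hcond]
      simp [pvNext]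

-- B-side: partition correctness
theorem pvPartitionDot_spec (s : List Char) :
    (pvPartitionDot s).2.1 = true →
      s = (pvPartitionDot s).1 ++ '.' :: (pvPartitionDot s).2.2 ∧ '.' ∉ (pvPartitionDot s).1 := by
  induction s with
  | nil => simp [pvPartitionDot]
  | cons c rest ih =>
    by_cases hc : c == '.'
    · have : c = '.' := by simpa using hc
      simp [pvPartitionDot, this]
    · intro h
      simp only [pvPartitionDot, hc, Bool.false_eq_true, if_false] at h ⊢
      obtain ⟨h1, h2⟩ := ih h
      constructor
      · simpa using congrArg (c :: ·) h1
      · simp only [List.mem_cons, not_or]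
        exact ⟨fun he => absurd (by simp [← he]) hc, h2⟩

theorem pvPartitionDot_nodot (s : List Char) :
    (pvPartitionDot s).2.1 = false → '.' ∉ s := by
  induction s with
  | nil => simp
  | cons c rest ih =>
    by_cases hc : c == '.'
    · simp [pvPartitionDot, hc]
    · intro h
      simp only [pvPartitionDot, hc, Bool.false_eq_true, if_false] at h
      simp only [List.mem_cons, not_or]
      exact ⟨fun he => absurd (by simp [← he]) hc, ih h⟩

def pvAfter (before : List Char) (b : Bool) : Bool :=
  match before.getLast? with
  | some ch => ch != ' '
  | none => b

theorem pvF_append_nodot (before : List Char) : ∀ (b : Bool) (t : List Char), '.' ∉ before →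
    pvF b (before ++ t) = before ++ pvF (pvAfter before b) t := by
  induction before with
  | nil => intro b t _; simp [pvAfter]
  | cons c bs ih =>
    intro b t hno
    have hc : (c == '.') = false := by
      simp only [List.mem_cons, not_or] at hno
      simpa using fun h => hno.1 h.symm
    have hbs : '.' ∉ bs := by simp only [List.mem_cons, not_or] at hno; exact hno.2
    have hgl : pvAfter bs (c != ' ') = pvAfter (c :: bs) b := by
      cases bs with
      | nil => simp [pvAfter]
      | cons d ds =>
        cases hgl : (d :: ds).getLast? with
        | none => simp at hgl
        | some ch => simp [pvAfter, List.getLast?_cons_cons, hgl]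
    rw [List.cons_append, pvF, ih (c != ' ') t hbs, hgl, hc]
    simp

theorem pvFix_eq_pvF (s : List Char) (b : Bool) : pvFix s b = pvF b s := by
  induction s, b using pvFix.induct with
  | case1 s b x y hp =>
    have hno : '.' ∉ s := pvPartitionDot_nodot s (by rw [hp])
    have h' : pvF b s = s := by
      have h := pvF_append_nodot s b [] hno
      simpa [pvF] using h
    rw [h']
    unfold pvFix
    split
    · rfl
    · next before rest hp2 =>
      rw [hp] at hp2
      simp at hp2
  | case2 s b before rest hp ih =>
    have hsp := pvPartitionDot_spec s (by rw [hp])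
    rw [hp] at hsp
    obtain ⟨hs, hno⟩ := hsp
    conv_rhs => rw [hs]
    rw [pvF_append_nodot before b ('.' :: rest) hno, pvF]
    unfold pvFix
    split
    · next x y hp2 =>
      rw [hp] at hp2
      simp at hp2
    · next before' rest' hp2 =>
      rw [hp] at hp2
      obtain ⟨hb', hr'⟩ : before = before' ∧ rest = rest' := by
        refine ⟨congrArg (fun p => p.1) hp2, congrArg (fun p => p.2.2) hp2⟩
      subst hb'
      subst hr'
      rw [ih]
      cases rest <;> simp [pvAfter, pvNext]

-- ===== VERDICT (by name: the statement is the Claim_ definition above) =====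
theorem replace_middle_dot_spec : Claim_equal_replace_middle_dot := by
  intro strings _
  unfold Spec_replace_middle_dot replace_middle_dot replace_middle_dot_alt
  apply List.map_congr_left
  intro str _
  congr 1
  rw [PySem.List.foldl_append_eq_flatMap, List.nil_append]
  have h0 : ((0 : Int)) = ((0 : Nat) : Int) := by norm_num
  rw [h0, pvEnumA str.toList str.toList 0 (by simp)]
  rw [pvFix_eq_pvF]
  have hf0 : pvFlag str.toList 0 = false := by simp [pvFlag]
  rw [hf0]
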